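-- pv_equiv track=rewrite | github.com/XuZhang99/dynamo | components/src/dynamo/global_router/pool_selection.py | get_priority_retry_order
-- ===== SOURCE A (Python) =====
-- from typing import Any, List, Optional
--
-- def get_priority_retry_order(
--     selected_pool: int,
--     pool_priorities: List[int],
--     enable_priority_retry: bool,
-- ) -> List[int]:
--     """
--     Return the initial pool followed by faster pools from slowest to fastest.
--
--     Lower priority numbers are faster. For example, with priorities [0, 1, 2],
--     a request selected for pool 2 retries pool 1 and then pool 0.
--     """
--     if not enable_priority_retry:
--         return [selected_pool]
--
--     if selected_pool < 0 or selected_pool >= len(pool_priorities):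
--         raise ValueError(
--             f"selected_pool {selected_pool} is out of range for "
--             f"{len(pool_priorities)} pool priorities"
--         )
--
--     selected_priority = pool_priorities[selected_pool]
--     faster_priorities = sorted(
--         {priority for priority in pool_priorities if priority < selected_priority},
--         reverse=True,
--     )
--
--     retry_order = [selected_pool]
--     for priority in faster_priorities:
--         retry_order.extend(
--             pool_idx
--             for pool_idx, pool_priority in enumerate(pool_priorities)
--             if pool_priority == priority
--         )
--     return retry_order
-- ===== SOURCE B (Python) =====
-- def get_priority_retry_order(
--     selected_pool,
--     pool_priorities,
--     enable_priority_retry,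
-- ):
--     """Bucket the indices of lower-priority pools in one pass, then walk priorities descending."""
--     if not enable_priority_retry:
--         return [selected_pool]
--
--     if selected_pool < 0 or selected_pool >= len(pool_priorities):
--         raise ValueError(
--             f"selected_pool {selected_pool} is out of range for "
--             f"{len(pool_priorities)} pool priorities"
--         )
--
--     selected_priority = pool_priorities[selected_pool]
--     buckets = {}
--     for idx, pri in enumerate(pool_priorities):
--         if pri < selected_priority:
--             buckets.setdefault(pri, []).append(idx)
--
--     order = [selected_pool]
--     for pri in sorted(buckets, reverse=True):
--         order.extend(buckets[pri])
--     return order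
-- ===== Notes on version B (the rewrite author's own statement) =====
-- stated objective: alternative
-- what changed: A rescans the whole priority list once per distinct priority value below the selected one; B buckets those indices by priority into a dict in one pass, then sorts the distinct priorities descending and concatenates the buckets.
import Mathlib
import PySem

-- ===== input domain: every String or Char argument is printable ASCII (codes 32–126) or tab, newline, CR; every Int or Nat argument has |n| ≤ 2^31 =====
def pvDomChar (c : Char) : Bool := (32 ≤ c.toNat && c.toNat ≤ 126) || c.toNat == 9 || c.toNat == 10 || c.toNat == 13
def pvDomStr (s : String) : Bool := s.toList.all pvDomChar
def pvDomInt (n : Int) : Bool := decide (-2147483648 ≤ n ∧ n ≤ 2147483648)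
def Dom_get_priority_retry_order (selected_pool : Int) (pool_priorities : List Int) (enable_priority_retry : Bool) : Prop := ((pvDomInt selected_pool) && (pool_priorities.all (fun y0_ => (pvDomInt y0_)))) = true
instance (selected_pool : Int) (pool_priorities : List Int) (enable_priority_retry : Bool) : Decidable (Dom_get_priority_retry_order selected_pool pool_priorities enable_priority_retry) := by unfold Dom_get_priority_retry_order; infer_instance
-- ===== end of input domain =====

-- B buckets the lower-priority pool indices by priority in one dict-building pass and
-- walks the distinct priorities in descending order, instead of A's rescan of the whole
-- priority list per distinct lower priority value.

-- ===== PORT A =====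
def get_priority_retry_order (selected_pool : Int) (pool_priorities : List Int) (enable_priority_retry : Bool) : List Int :=
  if !enable_priority_retry then [selected_pool]
  else if selected_pool < 0 ∨ (pool_priorities.length : Int) ≤ selected_pool then
    []  -- Python raises ValueError here; excluded by Pre_
  else
    let selected_priority := PySem.List.pyGetD pool_priorities selected_pool 0  -- in range under the guard
    let faster_priorities := PySem.List.sorted
      (PySem.Set.ofList (pool_priorities.filter (fun priority => decide (priority < selected_priority))))
      (fun x => x) true
    faster_priorities.foldl
      (fun retry_order priority =>
        retry_order ++ ((PySem.List.enumerate pool_priorities).filter (fun q => q.2 == priority)).map (fun q => q.1))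
      [selected_pool]

-- ===== PORT B =====
def get_priority_retry_order_alt (selected_pool : Int) (pool_priorities : List Int) (enable_priority_retry : Bool) : List Int :=
  if !enable_priority_retry then [selected_pool]
  else if selected_pool < 0 ∨ (pool_priorities.length : Int) ≤ selected_pool then
    []  -- Python raises ValueError here; excluded by Pre_
  else
    let selected_priority := PySem.List.pyGetD pool_priorities selected_pool 0  -- in range under the guard
    let buckets : PySem.Dict Int (List Int) :=
      (PySem.List.enumerate pool_priorities).foldl
        (fun d q => if q.2 < selected_priority then d.modify q.2 [] (fun b => b ++ [q.1]) else d)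
        PySem.Dict.empty
    (PySem.List.sorted buckets.keys (fun x => x) true).foldl
      (fun order pri => order ++ buckets.getD pri []) [selected_pool]

-- ===== PRECONDITION & SPEC =====
-- Pre_ excludes exactly the inputs on which A raises ValueError: priority retry enabled
-- with selected_pool out of range of pool_priorities (B raises the same error there).
def Pre_get_priority_retry_order (selected_pool : Int) (pool_priorities : List Int) (enable_priority_retry : Bool) : Prop :=
  enable_priority_retry = true → (0 ≤ selected_pool ∧ selected_pool < (pool_priorities.length : Int))
instance (selected_pool : Int) (pool_priorities : List Int) (enable_priority_retry : Bool) : Decidable (Pre_get_priority_retry_order selected_pool pool_priorities enable_priority_retry) := by unfold Pre_get_priority_retry_order; infer_instance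

def pvWitness_get_priority_retry_order : Int × List Int × Bool := (1, [0, 1, 1, 2], true)

def Spec_get_priority_retry_order (selected_pool : Int) (pool_priorities : List Int) (enable_priority_retry : Bool) (out : List Int) : Prop := out = get_priority_retry_order_alt selected_pool pool_priorities enable_priority_retry
instance (selected_pool : Int) (pool_priorities : List Int) (enable_priority_retry : Bool) (out : List Int) : Decidable (Spec_get_priority_retry_order selected_pool pool_priorities enable_priority_retry out) := by unfold Spec_get_priority_retry_order; infer_instance

-- ===== CLAIM (what is proved, stated in full; the proofs are below) =====
def Claim_equal_get_priority_retry_order : Prop := ∀ (selected_pool : Int) (pool_priorities : List Int) (enable_priority_retry : Bool), Dom_get_priority_retry_order selected_pool pool_priorities enable_priority_retry → Pre_get_priority_retry_order selected_pool pool_priorities enable_priority_retry → Spec_get_priority_retry_order selected_pool pool_priorities enable_priority_retry (get_priority_retry_order selected_pool pool_priorities enable_priority_retry)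

-- ===== LEMMAS AND PROOFS =====

-- B's bucket dict over any (priority, index) pair list: keys in first-occurrence order
lemma pv_bucket_keys (l : List (Int × Int)) :
    (l.foldl (fun d q => d.modify q.2 [] (fun b => b ++ [q.1])) PySem.Dict.empty).keys
    = PySem.Set.ofList (l.map (fun q => q.2)) := by
  have h := PySem.Dict.keys_foldl_modify_key l (fun q => q.2)
      ([] : List Int) (fun _ q b => b ++ [q.1]) PySem.Dict.empty
  simp only [] at h
  rw [h, PySem.Dict.keys_empty, PySem.Set.ofList_eq_foldl]
  rfl

-- B's bucket for priority k holds exactly the first components paired with k, in order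
lemma pv_bucket_getD (l : List (Int × Int)) (k : Int) :
    (l.foldl (fun d q => d.modify q.2 [] (fun b => b ++ [q.1])) PySem.Dict.empty).getD k []
    = (l.filter (fun q => q.2 == k)).map (fun q => q.1) := by
  have h : l.foldl (fun d q => d.modify q.2 [] (fun b => b ++ [q.1])) PySem.Dict.empty
      = (l.map (fun q => (q.2, q.1))).foldl
        (fun d p => d.modify p.1 [] (fun b => b ++ [p.2])) PySem.Dict.empty := by
    rw [List.foldl_map]
  rw [h, PySem.Dict.getD_foldl_modify_append]
  simp [List.filter_map, Function.comp_def]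

-- ===== VERDICT (by name: the statement is the Claim_ definition above) =====
theorem get_priority_retry_order_spec : Claim_equal_get_priority_retry_order := by
  intro sp xs e _ hpre
  unfold Spec_get_priority_retry_order get_priority_retry_order get_priority_retry_order_alt
  cases e with
  | false => simp
  | true =>
    obtain ⟨h0, h1⟩ := hpre rfl
    rw [if_neg (by omega : ¬(sp < 0 ∨ (xs.length : Int) ≤ sp)),
        if_neg (by omega : ¬(sp < 0 ∨ (xs.length : Int) ≤ sp))]
    simp only [Bool.not_true, Bool.false_eq_true, if_false]
    set s := PySem.List.pyGetD xs sp 0 with hs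
    -- B's guarded bucket-building loop is the same loop over the filtered pair list
    have hflt := PySem.List.foldl_ite_eq_foldl_filter
          (fun q : Int × Int => q.2 < s)
          (fun (d : PySem.Dict Int (List Int)) (q : Int × Int) => d.modify q.2 [] (fun b => b ++ [q.1]))
          (PySem.List.enumerate xs) PySem.Dict.empty
    simp only [] at hflt
    rw [hflt, pv_bucket_keys]
    -- the bucket keys are the distinct priorities below s, in first-occurrence order
    have hmap : ((PySem.List.enumerate xs).filter (fun q => decide (q.2 < s))).map (fun q => q.2)
        = xs.filter (fun v => decide (v < s)) := by
      have h := (List.filter_map (f := fun q : Int × Int => q.2)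
          (p := fun v => decide (v < s)) (l := PySem.List.enumerate xs)).symm
      simp only [Function.comp_def] at h
      rw [h, PySem.List.map_snd_enumerate]
    rw [hmap]
    -- both sides now fold over the same sorted distinct-priority list
    apply PySem.List.foldl_congr_mem'
    intro k hk acc
    rw [pv_bucket_getD, List.filter_filter]
    have hks : k < s := by
      have := (PySem.List.mem_sorted _ _ _ _).mp hk
      have hmem : k ∈ xs.filter (fun v => decide (v < s)) := by
        simpa [PySem.Set.mem_ofList] using this
      simpa using (List.mem_filter.mp hmem).2
    congr 1
    apply congrArg
    apply List.filter_congr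
    intro q _
    by_cases hq : q.2 = k
    · simp [hq, hks]
    · simp [hq]
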